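-- pv_equiv track=rewrite | github.com/deepan-alve/AdventofCode2025 | Day6/Day6-part2.py | split_cols
-- ===== SOURCE A (Python) =====
-- def split_cols(lines: list[str]) -> list[list[str]]:
--     width = max(len(line.rstrip("\n")) for line in lines)
--     grid = [line.rstrip("\n").ljust(width) for line in lines]
--     blocks: list[tuple[int, int]] = []
--     inside = False
--     start = 0
--     for x in range(width):
--         col = [row[x] for row in grid]
--         space_col = all(ch == " " for ch in col)
--         if not space_col and not inside:
--             inside = True
--             start = x
--         elif space_col and inside:
--             inside = False
--             blocks.append((start, x))
--     if inside:
--         blocks.append((start, width))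
--
--     res: list[list[str]] = []
--     for a, b in blocks:
--         slice_rows = [row[a:b] for row in grid]
--         last = slice_rows[-1]
--         op = "*" if "*" in last else "+"
--         digits_rows = slice_rows[:-1]
--         h = len(digits_rows)
--         w = b - a
--         nums: list[str] = []
--         for x in range(w - 1, -1, -1):
--             col_chars = [digits_rows[r][x] for r in range(h)]
--             digs = "".join(ch for ch in col_chars if ch != " ")
--             if digs:
--                 nums.append(digs)
--         res.append([op] + nums)
--     return res
-- ===== SOURCE B (Python) =====
-- def split_cols(lines: list[str]) -> list[list[str]]:
--     rows = [line.rstrip("\n") for line in lines]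
--     last = rows[-1]
--     body = rows[:-1]
--     # one row-major pass over the digit rows: column index -> concatenated digits, top to bottom
--     cells: dict[int, list[str]] = {}
--     for row in body:
--         for x, ch in enumerate(row):
--             if ch != " ":
--                 cells.setdefault(x, []).append(ch)
--     # occupied columns = digit columns plus non-space columns of the operator row
--     filled = set(cells)
--     for x, ch in enumerate(last):
--         if ch != " ":
--             filled.add(x)
--     stars = {x for x, ch in enumerate(last) if ch == "*"}
--     # blocks = maximal runs of consecutive occupied column indices
--     blocks: list[list[int]] = []
--     for x in sorted(filled):
--         if blocks and blocks[-1][1] == x: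
--             blocks[-1][1] = x + 1
--         else:
--             blocks.append([x, x + 1])
--     return [
--         ["*" if any(x in stars for x in range(a, b)) else "+"]
--         + ["".join(cells[x]) for x in range(b - 1, a - 1, -1) if x in cells]
--         for a, b in blocks
--     ]
-- ===== Notes on version B (the rewrite author's own statement) =====
-- stated objective: alternative
-- what changed: B drops A's padded grid and column-major scans entirely: one row-major pass builds a column->digits dict, the occupied-column set and the star-position set; blocks come from grouping the sorted occupied columns into maximal consecutive runs instead of A's inside/start state machine, and each block's operator and numbers are read off the dict/sets instead of re-slicing every row and re-scanning columns.
import Mathlib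
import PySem

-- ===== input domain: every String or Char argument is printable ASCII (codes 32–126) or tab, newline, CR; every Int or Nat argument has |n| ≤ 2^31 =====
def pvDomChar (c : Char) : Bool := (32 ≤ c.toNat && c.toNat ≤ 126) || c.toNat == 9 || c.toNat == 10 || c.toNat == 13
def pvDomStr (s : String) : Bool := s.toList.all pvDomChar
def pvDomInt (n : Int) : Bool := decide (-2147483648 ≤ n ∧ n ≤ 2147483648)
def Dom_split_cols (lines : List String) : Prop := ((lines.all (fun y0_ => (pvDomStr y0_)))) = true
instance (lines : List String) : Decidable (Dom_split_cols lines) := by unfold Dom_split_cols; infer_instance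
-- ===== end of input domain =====

-- B replaces A's padded-grid, column-major scans (per-column all() state machine, then per-block
-- row slicing and column re-scans) by ONE row-major pass building a column->digits dict, an
-- occupied-column set and a star-position set, then groups the sorted occupied columns into
-- maximal consecutive runs and reads each block off the dict (alternative decomposition).

-- shared helper (both Pythons call line.rstrip("\n")):
-- Python str.rstrip("\n") — exact: removes exactly the trailing '\n' characters
def pvRstripNl (s : List Char) : List Char := (List.dropWhile (fun c => c == '\n') s.reverse).reverse
-- Python str.ljust(w) with space fill (A only) — exact: Nat subtraction clamps at 0 as ljust does
def pvLjust (s : List Char) (w : Nat) : List Char := s ++ List.replicate (w - s.length) ' '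

-- ===== PORT A =====
def split_cols (lines : List String) : List (List String) :=
  let width : Nat := (PySem.List.max? (lines.map (fun line => (pvRstripNl line.toList).length)) (fun v => v)).getD 0
  let grid : List (List Char) := lines.map (fun line => pvLjust (pvRstripNl line.toList) width)
  let st := (PySem.List.pyRange 0 (width : Int) 1).foldl (fun (st : Bool × Int × List (Int × Int)) x =>
      let inside := st.1
      let start := st.2.1
      let blocks := st.2.2
      let col := grid.map (fun row => PySem.List.pyGetD row x ' ')
      let space_col := col.all (fun ch => ch == ' ')
      if !space_col && !inside then (true, x, blocks)
      else if space_col && inside then (false, start, blocks ++ [(start, x)])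
      else (inside, start, blocks)) (false, 0, [])
  let blocks := if st.1 then st.2.2 ++ [(st.2.1, (width : Int))] else st.2.2
  blocks.foldl (fun res ab =>
      let a := ab.1
      let b := ab.2
      let slice_rows := grid.map (fun row => PySem.List.slice row (some a) (some b))
      let last := PySem.List.pyGetD slice_rows (-1) []
      let op : String := if PySem.Chars.isIn ['*'] last then "*" else "+"
      let digits_rows := PySem.List.slice slice_rows none (some (-1))
      let h := digits_rows.length
      let w : Int := b - a
      let nums := (PySem.List.pyRange (w - 1) (-1) (-1)).foldl (fun (nums : List String) x =>
          let col_chars := (PySem.List.pyRange 0 (h : Int) 1).map (fun r =>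
              PySem.List.pyGetD (PySem.List.pyGetD digits_rows r []) x ' ')
          let digs := col_chars.filter (fun ch => !(ch == ' '))
          if digs ≠ [] then nums ++ [String.ofList digs] else nums) []
      res ++ [[op] ++ nums]) []

-- ===== PORT B =====
def split_cols_alt (lines : List String) : List (List String) :=
  let rows := lines.map (fun line => pvRstripNl line.toList)
  let last := PySem.List.pyGetD rows (-1) []          -- rows[-1]; [] never reached inside Pre_
  let body := PySem.List.slice rows none (some (-1))  -- rows[:-1]
  -- cells[x] = cells.get(x, "") + ch  (strings modelled as List Char, joined at the end)
  let cells : PySem.Dict Int (List Char) :=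
    body.foldl (fun cells row =>
      (PySem.List.enumerate row).foldl (fun (cells : PySem.Dict Int (List Char)) p =>
        if !(p.2 == ' ') then cells.modify p.1 [] (fun s => s ++ [p.2]) else cells) cells)
      PySem.Dict.empty
  let filled : PySem.Set Int :=
    (PySem.List.enumerate last).foldl (fun (s : PySem.Set Int) p =>
      if !(p.2 == ' ') then PySem.Set.add s p.1 else s) (PySem.Set.ofList cells.keys)
  let stars : PySem.Set Int :=
    PySem.Set.ofList (((PySem.List.enumerate last).filter (fun p => p.2 == '*')).map (fun p => p.1))
  let blocks : List (Int × Int) :=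
    (PySem.List.sorted filled (fun v => v) false).foldl (fun (g : List (Int × Int)) x =>
      match g.getLast? with
      | some p => if p.2 == x then g.dropLast ++ [(p.1, x + 1)] else g ++ [(x, x + 1)]
      | none => [(x, x + 1)]) []
  blocks.map (fun ab =>
    [if (PySem.List.pyRange ab.1 ab.2 1).any (fun x => PySem.Set.contains stars x) then "*" else "+"]
      ++ ((PySem.List.pyRange (ab.2 - 1) (ab.1 - 1) (-1)).filter (fun x => cells.contains x)).map
           (fun x => String.ofList (cells.getD x [])))

-- ===== PRECONDITION & SPEC =====
-- Pre_ excludes only the empty list, on which Python A raises ValueError (max() of an empty sequence).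
def Pre_split_cols (lines : List String) : Prop := lines ≠ []
instance (lines : List String) : Decidable (Pre_split_cols lines) := by unfold Pre_split_cols; infer_instance
def pvWitness_split_cols : List String := ["12 *", " 3 +"]
def Spec_split_cols (lines : List String) (out : List (List String)) : Prop := out = split_cols_alt lines
instance (lines : List String) (out : List (List String)) : Decidable (Spec_split_cols lines out) := by unfold Spec_split_cols; infer_instance

-- ===== CLAIM (what is proved, stated in full; the proofs are below) =====
def Claim_equal_split_cols : Prop := ∀ (lines : List String), Dom_split_cols lines → Pre_split_cols lines → Spec_split_cols lines (split_cols lines)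

-- ===== LEMMAS AND PROOFS =====
-- proof-side definitions -------------------------------------------------

-- A-side: padded-grid columns and A's state machine over Nat
def pvColf (G : List (List Char)) (x : Nat) : List Char := G.map (fun row => row.getD x ' ')
def pvFlag (G : List (List Char)) (x : Nat) : Bool := (pvColf G x).any (fun ch => !(ch == ' '))
def pvStep (G : List (List Char)) (st : Bool × Nat × List (Nat × Nat)) (k : Nat) : Bool × Nat × List (Nat × Nat) :=
  if pvFlag G k && !st.1 then (true, k, st.2.2)
  else if !(pvFlag G k) && st.1 then (false, st.2.1, st.2.2 ++ [(st.2.1, k)])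
  else st
def pvM (G : List (List Char)) (n : Nat) : Bool × Nat × List (Nat × Nat) :=
  (List.range n).foldl (pvStep G) (false, 0, [])
def pvE2 (l : List (Nat × Nat)) : List (Int × Int) := l.map (fun (p : Nat × Nat) => ((p.1 : Int), (p.2 : Int)))
def pvEmbed (st : Bool × Nat × List (Nat × Nat)) : Bool × Int × List (Int × Int) :=
  (st.1, (st.2.1 : Int), pvE2 st.2.2)

-- B-side: grouping of consecutive indices, occupied columns, digit columns
def pvGStep (g : List (Int × Int)) (x : Int) : List (Int × Int) :=
  match g.getLast? with
  | some p => if p.2 == x then g.dropLast ++ [(p.1, x + 1)] else g ++ [(x, x + 1)]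
  | none => [(x, x + 1)]
def pvGrp (l : List Int) : List (Int × Int) := l.foldl pvGStep []
def pvL (G : List (List Char)) (n : Nat) : List Int :=
  ((List.range n).filter (pvFlag G)).map (fun (k : Nat) => (k : Int))
def pvFlagR (rows : List (List Char)) (x : Nat) : Bool := rows.any (fun r => !(r.getD x ' ' == ' '))
def pvEvents (body : List (List Char)) : List (Int × Char) :=
  body.flatMap (fun row => (PySem.List.enumerate row).filter (fun p => !(p.2 == ' ')))
def pvCellsD (body : List (List Char)) (x : Int) : List Char :=
  (body.map (fun r => r.getD x.toNat ' ')).filter (fun ch => !(ch == ' '))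
def pvD (G : List (List Char)) (a b k : Nat) : List Char :=
  (G.dropLast.map (fun orig => orig.getD (a + (b - a - 1 - k)) ' ')).filter (fun ch => !(ch == ' '))

-- A's per-block body and B's per-block body as functions
def pvFA (G : List (List Char)) (ab : Int × Int) : List String :=
  let a := ab.1
  let b := ab.2
  let slice_rows := G.map (fun row => PySem.List.slice row (some a) (some b))
  let last := PySem.List.pyGetD slice_rows (-1) []
  let op : String := if PySem.Chars.isIn ['*'] last then "*" else "+"
  let digits_rows := PySem.List.slice slice_rows none (some (-1))
  let h := digits_rows.length
  let w : Int := b - a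
  let nums := (PySem.List.pyRange (w - 1) (-1) (-1)).foldl (fun (nums : List String) x =>
      let col_chars := (PySem.List.pyRange 0 (h : Int) 1).map (fun r =>
          PySem.List.pyGetD (PySem.List.pyGetD digits_rows r []) x ' ')
      let digs := col_chars.filter (fun ch => !(ch == ' '))
      if digs ≠ [] then nums ++ [String.ofList digs] else nums) []
  [op] ++ nums
def pvFB (cells : PySem.Dict Int (List Char)) (stars : PySem.Set Int) (ab : Int × Int) : List String :=
  [if (PySem.List.pyRange ab.1 ab.2 1).any (fun x => PySem.Set.contains stars x) then "*" else "+"]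
    ++ ((PySem.List.pyRange (ab.2 - 1) (ab.1 - 1) (-1)).filter (fun x => cells.contains x)).map
         (fun x => String.ofList (cells.getD x []))

-- small general facts ----------------------------------------------------

lemma pvM_succ (G : List (List Char)) (n : Nat) : pvM G (n+1) = pvStep G (pvM G n) n := by
  simp [pvM, List.range_succ]

lemma pvPad_getD (r : List Char) (W x : Nat) : (pvLjust r W).getD x ' ' = r.getD x ' ' := by
  rcases lt_or_ge x r.length with hx | hx
  · simp [pvLjust, List.getD_eq_getElem?_getD, List.getElem?_append_left hx]
  · rw [List.getD_eq_default _ _ hx]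
    simp only [pvLjust, List.getD_eq_getElem?_getD, List.getElem?_append_right hx,
      List.getElem?_replicate]
    split <;> rfl

lemma pvFlag_pad (rows : List (List Char)) (W x : Nat) :
    pvFlag (rows.map (fun r => pvLjust r W)) x = pvFlagR rows x := by
  unfold pvFlag pvColf pvFlagR
  rw [List.map_map, List.any_map]
  apply PySem.List.any_congr_mem
  intro r _
  have hp := pvPad_getD r W x
  simp only [List.getD_eq_getElem?_getD] at hp
  simp [Function.comp, hp]

lemma pvPyGetD_neg_one {α : Type} (xs : List α) (d : α) (h : xs ≠ []) :
    PySem.List.pyGetD xs (-1) d = (xs.getLast?).getD d := by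
  have hl : 0 < xs.length := List.length_pos_iff.mpr h
  simp only [PySem.List.pyGetD, PySem.List.pyGet?, PySem.List.pyIdx?]
  rw [if_neg (by omega), if_pos (by omega : -(xs.length : Int) ≤ -1)]
  simp only [Option.bind_some]
  rw [List.getLast?_eq_getElem?]
  norm_num

lemma pvMapGetD {α β : Type} (l : List α) (F : α → β) (d : α) :
    (List.range l.length).map (fun r => F (l.getD r d)) = l.map F := by
  apply List.ext_getElem
  · simp
  · intro i h1 h2
    have h1' : i < l.length := by simpa using h1
    simp [List.getD_eq_getElem?_getD, List.getElem?_eq_getElem h1']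

lemma pvGetD_take_drop {α : Type} (l : List α) (a n j : Nat) (d : α)
    (hj : j < n) (_hl : a + j < l.length) :
    ((l.drop a).take n).getD j d = l.getD (a + j) d := by
  rw [List.getD_eq_getElem?_getD, List.getD_eq_getElem?_getD]
  rw [List.getElem?_take_of_lt hj, List.getElem?_drop]

lemma pvOpEq (l : List Char) (a n : Nat) (hln : a + n ≤ l.length) :
    PySem.Chars.isIn ['*'] ((l.drop a).take n)
      = (List.range' a n).any (fun x => l.getD x ' ' == '*') := by
  apply Bool.eq_iff_iff.mpr
  rw [PySem.Chars.isIn_iff_infix, List.singleton_infix_iff, List.any_eq_true]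
  constructor
  · intro hm
    obtain ⟨i, hi, hgi⟩ := List.mem_iff_getElem.mp hm
    have hi' : i < n := by simpa using (List.length_take_le _ _).trans_lt' hi
    have hai : a + i < l.length := by
      have := hi
      simp [List.length_take, List.length_drop] at this
      omega
    refine ⟨a + i, List.mem_range'.mpr ⟨by omega, by omega⟩, ?_⟩
    simp only [List.getD_eq_getElem?_getD, List.getElem?_eq_getElem hai, Option.getD_some]
    have h2 : ((l.drop a).take n)[i] = l[a + i] := by
      rw [List.getElem_take, List.getElem_drop]
    rw [← h2, hgi]
    simp
  · rintro ⟨x, hx, hgx⟩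
    obtain ⟨hx1, hx2⟩ := List.mem_range'.mp hx
    have hxl : x < l.length := by omega
    have hgd : l.getD x ' ' = l[x] := by
      rw [List.getD_eq_getElem?_getD, List.getElem?_eq_getElem hxl]
      rfl
    have hxi : x - a < n := by omega
    have hlen : x - a < ((l.drop a).take n).length := by
      simp [List.length_take, List.length_drop]
      omega
    apply List.mem_iff_getElem.mpr
    refine ⟨x - a, hlen, ?_⟩
    have : ((l.drop a).take n)[x - a] = l[a + (x - a)] := by
      rw [List.getElem_take, List.getElem_drop]
    rw [this]
    have : a + (x - a) = x := by omega
    simp only [this]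
    rw [hgd] at hgx
    simpa using hgx

lemma pvSpace (G : List (List Char)) (k : Nat) :
    (pvColf G k).all (fun ch => ch == ' ') = !pvFlag G k := by
  unfold pvFlag
  suffices h : ∀ l : List Char, l.all (fun ch => ch == ' ') = !l.any (fun ch => !(ch == ' ')) from h _
  intro l
  induction l with
  | nil => rfl
  | cons c t ih =>
    simp only [List.all_cons, List.any_cons, Bool.not_or, ih]
    cases hc : (c == ' ') <;> simp

-- A's fold over range(width) is the Nat state machine pvM, embedded into Int
lemma pvA_fold (G : List (List Char)) (W : Nat) :
    (PySem.List.pyRange 0 (W : Int) 1).foldl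
      (fun (st : Bool × Int × List (Int × Int)) x =>
        let inside := st.1
        let start := st.2.1
        let blocks := st.2.2
        let col := G.map (fun row => PySem.List.pyGetD row x ' ')
        let space_col := col.all (fun ch => ch == ' ')
        if !space_col && !inside then (true, x, blocks)
        else if space_col && inside then (false, start, blocks ++ [(start, x)])
        else (inside, start, blocks)) (false, 0, [])
    = pvEmbed (pvM G W) := by
  rw [PySem.List.pyRange_one]
  simp only [Int.sub_zero, Int.toNat_natCast, zero_add]
  rw [List.foldl_map]
  unfold pvM
  have hbase : ((false, 0, []) : Bool × Int × List (Int × Int)) = pvEmbed (false, 0, []) := by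
    simp [pvEmbed, pvE2]
  rw [hbase]
  apply List.foldl_hom
  intro st k
  have hcol : G.map (fun row => PySem.List.pyGetD row (k : Int) ' ') = pvColf G k := by
    unfold pvColf
    simp [PySem.List.pyGetD_natCast]
  simp only [hcol, pvSpace, Bool.not_not]
  unfold pvStep pvEmbed pvE2
  rcases hf : pvFlag G k with _ | _ <;> rcases hi : st.1 with _ | _ <;> simp [hi]

-- the state machine computes exactly the grouping of the occupied columns
lemma pvInv (G : List (List Char)) (n : Nat) :
    pvGrp (pvL G n) = (if (pvM G n).1 then pvE2 (pvM G n).2.2 ++ [(((pvM G n).2.1 : Int), (n : Int))] else pvE2 (pvM G n).2.2)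
    ∧ (∀ p ∈ (pvM G n).2.2, p.1 < p.2 ∧ p.2 < n)
    ∧ ((pvM G n).1 = true → (pvM G n).2.1 < n) := by
  induction n with
  | zero => simp [pvM, pvL, pvGrp, pvE2]
  | succ n ih =>
    obtain ⟨h2, h3, h4⟩ := ih
    have hL : pvL G (n+1) = pvL G n ++ (if pvFlag G n then [(n : Int)] else []) := by
      simp only [pvL, List.range_succ, List.filter_append, List.filter_cons, List.filter_nil]
      split <;> simp
    rw [pvM_succ, hL]
    rcases hf : pvFlag G n with _ | _ <;> rcases hi : (pvM G n).1 with _ | _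
    · -- flag false, inside false: nothing happens
      have hstep : pvStep G (pvM G n) n = pvM G n := by simp [pvStep, hf, hi]
      rw [hstep]
      refine ⟨?_, fun p hp => ⟨(h3 p hp).1, lt_trans (h3 p hp).2 (by omega)⟩, by simp [hi]⟩
      simp [hi, h2]
    · -- flag false, inside true: close the open block at n
      have hstep : pvStep G (pvM G n) n
          = (false, (pvM G n).2.1, (pvM G n).2.2 ++ [((pvM G n).2.1, n)]) := by
        simp [pvStep, hf, hi]
      rw [hstep]
      refine ⟨?_, ?_, by simp⟩
      · simp [hi, h2, pvE2]
      · intro p hp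
        rcases List.mem_append.mp hp with hp | hp
        · exact ⟨(h3 p hp).1, lt_trans (h3 p hp).2 (by omega)⟩
        · simp only [List.mem_singleton] at hp
          subst hp
          exact ⟨h4 hi, by omega⟩
    · -- flag true, inside false: open a block at n
      have hstep : pvStep G (pvM G n) n = (true, n, (pvM G n).2.2) := by
        simp [pvStep, hf, hi]
      rw [hstep]
      have hgs : pvGrp (pvL G n ++ [(n : Int)]) = pvGStep (pvGrp (pvL G n)) (n : Int) := by
        rw [pvGrp, List.foldl_append]
        rfl
      refine ⟨?_, fun p hp => ⟨(h3 p hp).1, lt_trans (h3 p hp).2 (by omega)⟩,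
        fun _ => by simp⟩
      rcases hlast : (pvE2 (pvM G n).2.2).getLast? with _ | q
      · have hnil : pvE2 (pvM G n).2.2 = [] := List.getLast?_eq_none_iff.mp hlast
        rw [show (if (true : Bool) = true then [(n : Int)] else []) = [(n : Int)] from rfl, hgs, h2, hi]
        push_cast
        simp [pvGStep, hnil]
      · have hqmem : q ∈ pvE2 (pvM G n).2.2 := List.mem_of_getLast? hlast
        obtain ⟨p, hp, rfl⟩ := List.mem_map.mp hqmem
        have hne2 : (((p.1 : Int), (p.2 : Int)).2 == (n : Int)) = false := by
          have := h3 p hp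
          simp only [beq_eq_false_iff_ne, ne_eq]
          intro hcon
          have : p.2 = n := by exact_mod_cast hcon
          omega
        rw [show (if (true : Bool) = true then [(n : Int)] else []) = [(n : Int)] from rfl, hgs, h2, hi]
        push_cast
        simp [pvGStep, hlast, hne2]
    · -- flag true, inside true: extend the open block
      have hstep : pvStep G (pvM G n) n = pvM G n := by simp [pvStep, hf, hi]
      rw [hstep]
      have hgs : pvGrp (pvL G n ++ [(n : Int)]) = pvGStep (pvGrp (pvL G n)) (n : Int) := by
        rw [pvGrp, List.foldl_append]
        rfl
      refine ⟨?_, fun p hp => ⟨(h3 p hp).1, lt_trans (h3 p hp).2 (by omega)⟩,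
        fun _ => lt_trans (h4 hi) (by omega)⟩
      rw [show (if (true : Bool) = true then [(n : Int)] else []) = [(n : Int)] from rfl, hgs, h2, hi]
      push_cast
      simp [pvGStep]

lemma pvGrp_blocks (G : List (List Char)) (W : Nat) :
    (if (pvEmbed (pvM G W)).1 then (pvEmbed (pvM G W)).2.2 ++ [((pvEmbed (pvM G W)).2.1, (W : Int))] else (pvEmbed (pvM G W)).2.2)
      = pvGrp (pvL G W) := by
  unfold pvEmbed
  exact (pvInv G W).1.symm

lemma pvGrp_bounds (G : List (List Char)) (W : Nat) :
    ∀ p ∈ pvGrp (pvL G W), 0 ≤ p.1 ∧ p.1 < p.2 ∧ p.2 ≤ (W : Int) := by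
  obtain ⟨h2, h3, h4⟩ := pvInv G W
  rw [h2]
  rcases hi : (pvM G W).1 with _ | _
  · simp only [Bool.false_eq_true, if_false]
    intro p hp
    obtain ⟨q, hq, rfl⟩ := List.mem_map.mp hp
    have := h3 q hq
    refine ⟨by positivity, by show ((q.1 : Int)) < ((q.2 : Int)); exact_mod_cast this.1,
      by show ((q.2 : Int)) ≤ (W : Int); exact_mod_cast le_of_lt this.2⟩
  · simp only [if_true]
    intro p hp
    rcases List.mem_append.mp hp with h | h
    · obtain ⟨q, hq, rfl⟩ := List.mem_map.mp h
      have := h3 q hq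
      refine ⟨by positivity, by show ((q.1 : Int)) < ((q.2 : Int)); exact_mod_cast this.1,
        by show ((q.2 : Int)) ≤ (W : Int); exact_mod_cast le_of_lt this.2⟩
    · simp only [List.mem_singleton] at h
      subst h
      have := h4 hi
      refine ⟨by positivity, by show (((pvM G W).2.1 : Int)) < (W : Int); exact_mod_cast this,
        le_refl _⟩

lemma pvL_mem (G : List (List Char)) (n : Nat) (x : Int) :
    x ∈ pvL G n ↔ 0 ≤ x ∧ x.toNat < n ∧ pvFlag G x.toNat = true := by
  unfold pvL
  rw [List.mem_map]
  constructor
  · rintro ⟨k, hk, rfl⟩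
    obtain ⟨hkr, hkf⟩ := List.mem_filter.mp hk
    exact ⟨by positivity, by simpa using List.mem_range.mp hkr, by simpa using hkf⟩
  · rintro ⟨h0, hn, hf⟩
    exact ⟨x.toNat, List.mem_filter.mpr ⟨List.mem_range.mpr hn, hf⟩, by omega⟩

lemma pvL_pairwise (G : List (List Char)) (n : Nat) :
    (pvL G n).Pairwise (fun a b => a < b) := by
  unfold pvL
  apply List.Pairwise.map (fun (k : Nat) => (k : Int))
  · intro a b hab2
    exact_mod_cast hab2
  · exact List.Pairwise.filter _ List.pairwise_lt_range

lemma pvL_nodup (G : List (List Char)) (n : Nat) : (pvL G n).Nodup :=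
  (pvL_pairwise G n).imp (fun h => ne_of_lt h)

-- B-side characterizations -----------------------------------------------

lemma pvMemKeyFilter (l : List (Int × Char)) (x : Int) :
    x ∈ l.map (fun p => p.1) ↔ l.filter (fun p => p.1 == x) ≠ [] := by
  rw [List.mem_map, Ne, List.filter_eq_nil_iff]
  push Not
  constructor
  · rintro ⟨p, hp, rfl⟩; exact ⟨p, hp, by simp⟩
  · rintro ⟨p, hp, h⟩; exact ⟨p, hp, by simpa using h⟩

lemma pvRangeFilterNat (n m : Nat) : (List.range n).filter (fun k => k == m) = if m < n then [m] else [] := by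
  induction n with
  | zero => simp
  | succ n ih =>
    rw [List.range_succ, List.filter_append, ih]
    by_cases h1 : m < n
    · rw [if_pos h1, if_pos (by omega)]
      have : (n == m) = false := by simp; omega
      simp [this]
    · rw [if_neg h1]
      by_cases h2 : m = n
      · subst h2; simp
      · rw [if_neg (by omega)]; simp; omega

lemma pvEnumKey (row : List Char) (x : Int) (hx : 0 ≤ x) :
    (PySem.List.enumerate row).filter (fun p => p.1 == x)
      = if x < (row.length : Int) then [(x, row.getD x.toNat ' ')] else [] := by
  rw [PySem.List.enumerate_eq_map_pyRange row ' ', List.filter_map]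
  have h1 : (PySem.List.pyRange 0 (PySem.List.len row) 1).filter
      ((fun (p : Int × Char) => p.1 == x) ∘ (fun j => (j, PySem.List.pyGetD row j ' ')))
      = (PySem.List.pyRange 0 (PySem.List.len row) 1).filter (fun j => j == x) := by
    apply List.filter_congr
    intro j _
    rfl
  rw [h1, PySem.List.len_eq, PySem.List.pyRange_one]
  simp only [Int.sub_zero, Int.toNat_natCast]
  rw [List.filter_map]
  have h2 : (List.range row.length).filter ((fun j => j == x) ∘ (fun (k : Nat) => ((0 : Int) + k)))
      = (List.range row.length).filter (fun k => k == x.toNat) := by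
    apply List.filter_congr
    intro k _
    have : ((0 : Int) + (k : Nat) == x) = ((k : Nat) == x.toNat) := by
      apply Bool.eq_iff_iff.mpr
      simp only [beq_iff_eq]
      constructor <;> intro h <;> omega
    exact this
  rw [h2, pvRangeFilterNat]
  by_cases h : x.toNat < row.length
  · rw [if_pos h, if_pos (by omega)]
    simp only [List.map_cons, List.map_nil]
    have hcast : ((0 : Int) + (x.toNat : Int)) = x := by omega
    rw [hcast]
    congr 2
    rw [PySem.List.pyGetD_of_nonneg _ _ hx]
  · rw [if_neg h, if_neg (by omega)]
    simp

lemma pvRowAt (row : List Char) (q : Char → Bool) (x : Int) (hx : 0 ≤ x) (hq : q ' ' = false) :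
    (((PySem.List.enumerate row).filter (fun p => q p.2)).filter (fun p => p.1 == x))
      = ([((x : Int), row.getD x.toNat ' ')].filter (fun p => q p.2)) := by
  have h1 : (((PySem.List.enumerate row).filter (fun p => q p.2)).filter (fun p => p.1 == x))
      = (((PySem.List.enumerate row).filter (fun p => p.1 == x)).filter (fun p => q p.2)) := by
    rw [List.filter_filter, List.filter_filter]
    apply List.filter_congr
    intro p _
    rw [Bool.and_comm]
  rw [h1, pvEnumKey row x hx]
  by_cases h : x < (row.length : Int)
  · rw [if_pos h]
  · rw [if_neg h]
    have : row.getD x.toNat ' ' = ' ' := List.getD_eq_default _ _ (by omega)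
    rw [this]
    simp [hq]

lemma pvFlatSingle (l : List (List Char)) (f : List Char → Char) (q : Char → Bool) :
    (l.flatMap (fun r => ([(f r)].filter q))) = (l.map f).filter q := by
  induction l with
  | nil => rfl
  | cons r t ih =>
    rw [List.flatMap_cons, ih, List.map_cons, List.filter_cons]
    by_cases h : q (f r) = true <;> simp [h]

lemma pvEvents_at (body : List (List Char)) (x : Int) (hx : 0 ≤ x) :
    ((pvEvents body).filter (fun p => p.1 == x)).map (fun p => p.2) = pvCellsD body x := by
  unfold pvEvents pvCellsD
  rw [List.filter_flatMap, List.map_flatMap]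
  have h1 : (fun (row : List Char) =>
      (((PySem.List.enumerate row).filter (fun p => !(p.2 == ' '))).filter (fun p => p.1 == x)).map (fun p => p.2))
      = fun row => ([row.getD x.toNat ' '].filter (fun ch => !(ch == ' '))) := by
    funext row
    rw [pvRowAt row (fun c => !(c == ' ')) x hx (by decide)]
    generalize row.getD x.toNat ' ' = c
    by_cases h : (c == ' ') = true <;> simp [h]
  rw [h1]
  exact pvFlatSingle body (fun r => r.getD x.toNat ' ') (fun ch => !(ch == ' '))

lemma pvEvents_nonneg (body : List (List Char)) : ∀ p ∈ pvEvents body, 0 ≤ p.1 := by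
  intro p hp
  obtain ⟨row, _, hmem⟩ := List.mem_flatMap.mp hp
  obtain ⟨k, hk, rfl⟩ := (PySem.List.mem_enumerate_iff _ _ _).mp (List.mem_of_mem_filter hmem)
  simp

lemma pvCellsD_ne_iff (body : List (List Char)) (x : Int) :
    pvCellsD body x ≠ [] ↔ ∃ r ∈ body, ¬(r.getD x.toNat ' ' == ' ') := by
  rw [pvCellsD, Ne, List.filter_eq_nil_iff]
  push Not
  constructor
  · rintro ⟨c, hc, h⟩
    obtain ⟨r, hr, rfl⟩ := List.mem_map.mp hc
    exact ⟨r, hr, by simpa using h⟩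
  · rintro ⟨r, hr, h⟩
    exact ⟨_, List.mem_map_of_mem hr, by simpa using h⟩

-- the nested cells loop, flattened
lemma pvCells_eq (body : List (List Char)) :
    body.foldl (fun cells row =>
      (PySem.List.enumerate row).foldl (fun (cells : PySem.Dict Int (List Char)) p =>
        if !(p.2 == ' ') then cells.modify p.1 [] (fun s => s ++ [p.2]) else cells) cells)
      PySem.Dict.empty
    = (pvEvents body).foldl (fun d p => d.modify p.1 [] (fun s => s ++ [p.2])) PySem.Dict.empty := by
  rw [pvEvents, List.foldl_flatMap]
  refine (PySem.List.foldl_congr_mem _ _ _ _ ?_).symm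
  intro acc row _
  rw [List.foldl_filter]

lemma pvCells_getD (body : List (List Char)) (x : Int) (hx : 0 ≤ x) :
    ((pvEvents body).foldl (fun d p => d.modify p.1 [] (fun s => s ++ [p.2])) PySem.Dict.empty).getD x []
      = pvCellsD body x := by
  rw [PySem.Dict.getD_foldl_modify_append, PySem.Dict.getD_empty, List.nil_append]
  exact pvEvents_at body x hx

lemma pvCells_keys (body : List (List Char)) :
    ((pvEvents body).foldl (fun d p => d.modify p.1 [] (fun s => s ++ [p.2])) PySem.Dict.empty).keys
      = PySem.Set.ofList ((pvEvents body).map (fun p => p.1)) := by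
  rw [PySem.Dict.keys_foldl_modify_key (pvEvents body) (fun p => p.1) [] (fun _ p => fun s => s ++ [p.2]) PySem.Dict.empty]
  simp [PySem.Set.update_nil_left]

lemma pvCells_contains (body : List (List Char)) (x : Int) (hx : 0 ≤ x) :
    ((pvEvents body).foldl (fun d p => d.modify p.1 [] (fun s => s ++ [p.2])) PySem.Dict.empty).contains x
      = true ↔ pvCellsD body x ≠ [] := by
  rw [PySem.Dict.contains_iff_mem_keys, pvCells_keys, PySem.Set.mem_ofList, pvMemKeyFilter,
    ← pvEvents_at body x hx, Ne, Ne, List.map_eq_nil_iff]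

lemma pvEventsKeyMem (body : List (List Char)) (x : Int) :
    x ∈ (pvEvents body).map (fun p => p.1) ↔ 0 ≤ x ∧ pvCellsD body x ≠ [] := by
  constructor
  · intro hx
    have h0 : 0 ≤ x := by
      obtain ⟨p, hp, rfl⟩ := List.mem_map.mp hx
      exact pvEvents_nonneg body p hp
    refine ⟨h0, ?_⟩
    rw [← pvEvents_at body x h0, Ne, List.map_eq_nil_iff]
    exact (pvMemKeyFilter _ _).mp hx
  · rintro ⟨h0, hne⟩
    rw [pvMemKeyFilter]
    rw [← pvEvents_at body x h0, Ne, List.map_eq_nil_iff] at hne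
    exact hne

lemma pvRowKeyMem (row : List Char) (q : Char → Bool) (x : Int) (hq : q ' ' = false) :
    x ∈ ((PySem.List.enumerate row).filter (fun p => q p.2)).map (fun p => p.1)
      ↔ 0 ≤ x ∧ q (row.getD x.toNat ' ') = true := by
  constructor
  · intro hx
    obtain ⟨p, hp, rfl⟩ := List.mem_map.mp hx
    obtain ⟨hp1, hp2⟩ := List.mem_filter.mp hp
    obtain ⟨k, hk, rfl⟩ := (PySem.List.mem_enumerate_iff _ _ _).mp hp1
    refine ⟨by simp, ?_⟩
    have h1 : (((0 : Int) + (k : Nat), row[k]).1).toNat = k := by simp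
    rw [h1]
    have h2 : row.getD k ' ' = row[k] := by
      rw [List.getD_eq_getElem?_getD, List.getElem?_eq_getElem hk]
      rfl
    rw [h2]
    exact hp2
  · rintro ⟨h0, hqx⟩
    rw [pvMemKeyFilter, pvRowAt row q x h0 hq]
    rw [List.getD_eq_getElem?_getD] at hqx
    simp [hqx]

lemma pvStars_contains (lastR : List Char) (y : Int) (hy : 0 ≤ y) :
    PySem.Set.contains (PySem.Set.ofList (((PySem.List.enumerate lastR).filter (fun p => p.2 == '*')).map (fun p => p.1))) y
      = (lastR.getD y.toNat ' ' == '*') := by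
  apply Bool.eq_iff_iff.mpr
  rw [PySem.Set.contains_iff, PySem.Set.mem_ofList,
    pvRowKeyMem lastR (fun c => c == '*') y (by decide), beq_iff_eq]
  exact ⟨fun h => h.2, fun h => ⟨hy, h⟩⟩

lemma pvFlagR_lt (rows : List (List Char)) (W : Nat) (hlen : ∀ r ∈ rows, r.length ≤ W)
    (k : Nat) (h : pvFlagR rows k = true) : k < W := by
  rw [pvFlagR, List.any_eq_true] at h
  obtain ⟨r, hr, hner⟩ := h
  by_contra hk
  have hrk : r.length ≤ k := le_trans (hlen r hr) (by omega)
  rw [List.getD_eq_default _ _ hrk] at hner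
  simp at hner

lemma pvFlagR_split (rows : List (List Char)) (hrne : rows ≠ []) (k : Nat) :
    pvFlagR rows k = ((rows.dropLast.any (fun r => !(r.getD k ' ' == ' '))) || !((rows.getLast hrne).getD k ' ' == ' ')) := by
  conv_lhs => rw [pvFlagR, ← List.dropLast_concat_getLast hrne]
  simp [List.any_append]

-- A's per-block loop, in normal form
lemma pvFA_norm (G : List (List Char)) (W : Nat) (hG : ∀ row ∈ G, row.length = W)
    (hne : G ≠ []) (a b : Nat) (hab : a < b) (hbW : b ≤ W) :
    pvFA G ((a : Int), (b : Int))
      = (if PySem.Chars.isIn ['*'] (((G.getLast hne).drop a).take (b - a)) then "*" else "+")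
        :: ((List.range (b - a)).filter (fun k => decide (pvD G a b k ≠ []))).map (fun k => String.ofList (pvD G a b k)) := by
  have hba : ((b : Int) - (a : Int)) = ((b - a : Nat) : Int) := by omega
  unfold pvFA
  simp only [PySem.List.slice_natCast, PySem.List.slice_to_neg_one]
  have hne' : G.map (fun row => (row.drop a).take (b - a)) ≠ [] := by simpa using hne
  have hlast : PySem.List.pyGetD (G.map (fun row => (row.drop a).take (b - a))) (-1) []
      = ((G.getLast hne).drop a).take (b - a) := by
    rw [pvPyGetD_neg_one _ _ hne', List.getLast?_map, List.getLast?_eq_some_getLast hne]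
    rfl
  rw [hlast]
  have hdr : (G.map (fun row => (row.drop a).take (b - a))).dropLast
      = G.dropLast.map (fun row => (row.drop a).take (b - a)) := List.map_dropLast.symm
  rw [hdr]
  rw [hba, PySem.List.pyRange_neg_one]
  have hn : ((((b - a : Nat) : Int) - 1) - (-1)).toNat = b - a := by omega
  rw [hn, List.foldl_map]
  have hstep : ∀ (acc : List String), ∀ k ∈ List.range (b - a),
      (fun (nums : List String) x =>
        let col_chars := (PySem.List.pyRange 0 ((G.dropLast.map (fun row => (row.drop a).take (b - a))).length : Int) 1).map (fun r =>
            PySem.List.pyGetD (PySem.List.pyGetD (G.dropLast.map (fun row => (row.drop a).take (b - a))) r []) x ' ')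
        let digs := col_chars.filter (fun ch => !(ch == ' '))
        if digs ≠ [] then nums ++ [String.ofList digs] else nums) acc (((b - a : Nat) : Int) - 1 - (k : Int))
      = (fun (nums : List String) k =>
          if decide (pvD G a b k ≠ []) = true then nums ++ [String.ofList (pvD G a b k)] else nums) acc k := by
    intro acc k hk
    have hk' : k < b - a := List.mem_range.mp hk
    have hx : (((b - a : Nat) : Int) - 1 - (k : Int)) = ((b - a - 1 - k : Nat) : Int) := by omega
    have hcc : (PySem.List.pyRange 0 ((G.dropLast.map (fun row => (row.drop a).take (b - a))).length : Int) 1).map (fun r =>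
            PySem.List.pyGetD (PySem.List.pyGetD (G.dropLast.map (fun row => (row.drop a).take (b - a))) r []) (((b - a : Nat) : Int) - 1 - (k : Int)) ' ')
        = G.dropLast.map ((fun row => PySem.List.pyGetD row (((b - a : Nat) : Int) - 1 - (k : Int)) ' ') ∘ (fun row => (row.drop a).take (b - a))) := by
      rw [PySem.List.pyRange_one]
      simp only [Int.sub_zero, Int.toNat_natCast, zero_add]
      rw [List.map_map]
      have : ((fun r => PySem.List.pyGetD (PySem.List.pyGetD (G.dropLast.map (fun row => (row.drop a).take (b - a))) r []) (((b - a : Nat) : Int) - 1 - (k : Int)) ' ') ∘ (fun (r : Nat) => (r : Int)))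
          = fun (r : Nat) => PySem.List.pyGetD ((G.dropLast.map (fun row => (row.drop a).take (b - a))).getD r []) (((b - a : Nat) : Int) - 1 - (k : Int)) ' ' := by
        funext r
        simp [Function.comp, PySem.List.pyGetD_natCast]
      rw [this]
      rw [pvMapGetD (G.dropLast.map (fun row => (row.drop a).take (b - a)))
        (fun row => PySem.List.pyGetD row (((b - a : Nat) : Int) - 1 - (k : Int)) ' ') []]
      rw [List.map_map]
    have hcomp : (G.dropLast.map ((fun row => PySem.List.pyGetD row (((b - a : Nat) : Int) - 1 - (k : Int)) ' ') ∘ (fun row => (row.drop a).take (b - a))))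
        = G.dropLast.map (fun orig => orig.getD (a + (b - a - 1 - k)) ' ') := by
      apply List.map_congr_left
      intro orig horig
      have hoW : orig.length = W := hG _ (List.dropLast_subset G horig)
      simp only [Function.comp]
      rw [hx, PySem.List.pyGetD_natCast]
      exact pvGetD_take_drop orig a (b - a) (b - a - 1 - k) ' ' (by omega) (by omega)
    simp only [hcc, hcomp]
    simp [pvD, decide_eq_true_eq]
  rw [PySem.List.foldl_congr_mem _ _ _ _ hstep]
  rw [PySem.List.foldl_append_if (fun k => decide (pvD G a b k ≠ [])) (fun k => String.ofList (pvD G a b k))]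
  simp

-- B's sorted occupied-column set is exactly the ascending list of flagged columns
lemma pvSorted (rows : List (List Char)) (W : Nat) (hrne : rows ≠ [])
    (hlen : ∀ r ∈ rows, r.length ≤ W) :
    PySem.List.sorted
      ((PySem.List.enumerate (rows.getLast hrne)).foldl
        (fun (s : PySem.Set Int) p => if !(p.2 == ' ') then PySem.Set.add s p.1 else s)
        (PySem.Set.ofList ((pvEvents rows.dropLast).foldl (fun d p => d.modify p.1 [] (fun s => s ++ [p.2])) PySem.Dict.empty).keys))
      (fun v => v) false
    = pvL (rows.map (fun r => pvLjust r W)) W := by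
  have hfold : ∀ S0 : PySem.Set Int,
      (PySem.List.enumerate (rows.getLast hrne)).foldl
        (fun (s : PySem.Set Int) p => if !(p.2 == ' ') then PySem.Set.add s p.1 else s) S0
      = PySem.Set.update S0 (((PySem.List.enumerate (rows.getLast hrne)).filter (fun p => !(p.2 == ' '))).map (fun p => p.1)) := by
    intro S0
    rw [PySem.Set.update_map_eq_foldl_add, List.foldl_filter]
  rw [hfold, pvCells_keys, PySem.Set.ofList_ofList]
  apply PySem.List.sorted_eq_of_perm_of_pairwise_lt
  · refine (List.perm_ext_iff_of_nodup (pvL_nodup _ _) ?_).mpr ?_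
    · exact PySem.Set.nodup_update _ _ (PySem.Set.nodup_ofList _)
    · intro x
      rw [PySem.Set.mem_update, PySem.Set.mem_ofList, pvEventsKeyMem,
        pvRowKeyMem (rows.getLast hrne) (fun c => !(c == ' ')) x (by decide), pvL_mem]
      constructor
      · rintro ⟨h0, hxW, hkf⟩
        have hflag : pvFlagR rows x.toNat = true := by
          rw [← pvFlag_pad rows W x.toNat]
          exact hkf
        rw [pvFlagR_split rows hrne x.toNat] at hflag
        simp only [Bool.or_eq_true] at hflag
        rcases hflag with hbody | hlast2
        · left
          refine ⟨h0, ?_⟩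
          rw [pvCellsD_ne_iff]
          rw [List.any_eq_true] at hbody
          obtain ⟨r, hr, hrr⟩ := hbody
          exact ⟨r, hr, by simpa using hrr⟩
        · right
          exact ⟨h0, hlast2⟩
      · intro hx
        have h0 : 0 ≤ x := by rcases hx with ⟨h, _⟩ | ⟨h, _⟩ <;> exact h
        have hflag : pvFlagR rows x.toNat = true := by
          rw [pvFlagR_split rows hrne x.toNat]
          simp only [Bool.or_eq_true]
          rcases hx with ⟨_, hb⟩ | ⟨_, hl⟩
          · left
            rw [pvCellsD_ne_iff] at hb
            rw [List.any_eq_true]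
            obtain ⟨r, hr, hrr⟩ := hb
            exact ⟨r, hr, by simpa using hrr⟩
          · right
            exact hl
        have hxW : x.toNat < W := pvFlagR_lt rows W hlen x.toNat hflag
        refine ⟨h0, hxW, ?_⟩
        rw [pvFlag_pad rows W x.toNat]
        exact hflag
  · exact pvL_pairwise _ _

-- one block: B's dict/set reads equal A's slice-and-rescan
lemma pvBlock_eq (rows : List (List Char)) (W : Nat) (hrne : rows ≠ [])
    (hlen : ∀ r ∈ rows, r.length ≤ W) (a b : Nat) (hab : a < b) (hbW : b ≤ W) :
    ([if (PySem.List.pyRange ((a : Nat) : Int) ((b : Nat) : Int) 1).any (fun x =>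
        PySem.Set.contains (PySem.Set.ofList (((PySem.List.enumerate (rows.getLast hrne)).filter (fun p => p.2 == '*')).map (fun p => p.1))) x) then "*" else "+"]
      ++ ((PySem.List.pyRange (((b : Nat) : Int) - 1) (((a : Nat) : Int) - 1) (-1)).filter (fun x =>
            ((pvEvents rows.dropLast).foldl (fun d p => d.modify p.1 [] (fun s => s ++ [p.2])) PySem.Dict.empty).contains x)).map
           (fun x => String.ofList (((pvEvents rows.dropLast).foldl (fun d p => d.modify p.1 [] (fun s => s ++ [p.2])) PySem.Dict.empty).getD x [])))
      = pvFA (rows.map (fun r => pvLjust r W)) (((a : Nat) : Int), ((b : Nat) : Int)) := by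
  have hG : ∀ row ∈ rows.map (fun r => pvLjust r W), row.length = W := by
    intro row hrow
    obtain ⟨r, hr, rfl⟩ := List.mem_map.mp hrow
    have := hlen r hr
    simp only [pvLjust, List.length_append, List.length_replicate]
    omega
  have hGne : rows.map (fun r => pvLjust r W) ≠ [] := by simpa using hrne
  rw [pvFA_norm _ W hG hGne a b hab hbW]
  have hGlast : (rows.map (fun r => pvLjust r W)).getLast hGne = pvLjust (rows.getLast hrne) W := by
    have h1 : (rows.map (fun r => pvLjust r W)).getLast? = some (pvLjust (rows.getLast hrne) W) := by
      rw [List.getLast?_map, List.getLast?_eq_some_getLast hrne]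
      rfl
    have h2 := List.getLast?_eq_some_getLast hGne
    rw [h1] at h2
    exact (Option.some_inj.mp h2).symm
  rw [List.singleton_append]
  congr 1
  · -- the operator of the block
    congr 1
    rw [hGlast, pvOpEq (pvLjust (rows.getLast hrne) W) a (b - a) (by
      have := hlen _ (List.getLast_mem hrne)
      simp only [pvLjust, List.length_append, List.length_replicate]
      omega)]
    rw [PySem.List.pyRange_one]
    have h3 : (((b : Nat) : Int) - ((a : Nat) : Int)).toNat = b - a := by omega
    rw [h3, List.any_map, List.range'_eq_map_range, List.any_map]
    refine congrArg (fun b => b = true) ?_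
    apply PySem.List.any_congr_mem
    intro k _
    simp only [Function.comp]
    rw [pvStars_contains _ _ (by positivity)]
    have h4 : (((a : Nat) : Int) + ((k : Nat) : Int)).toNat = a + k := by omega
    rw [h4, pvPad_getD]
  · -- the digit strings of the block
    rw [PySem.List.pyRange_neg_one]
    have h5 : ((((b : Nat) : Int) - 1) - (((a : Nat) : Int) - 1)).toNat = b - a := by omega
    rw [h5, List.filter_map, List.map_map]
    have hdl : (rows.map (fun r => pvLjust r W)).dropLast = rows.dropLast.map (fun r => pvLjust r W) :=
      List.map_dropLast.symm
    have hgd : ∀ k ∈ List.range (b - a),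
        ((pvEvents rows.dropLast).foldl (fun d p => d.modify p.1 [] (fun s => s ++ [p.2])) PySem.Dict.empty).getD ((((b : Nat) : Int) - 1) - ((k : Nat) : Int)) []
          = pvD (rows.map (fun r => pvLjust r W)) a b k := by
      intro k hk
      have hk' : k < b - a := List.mem_range.mp hk
      have h0 : (0 : Int) ≤ (((b : Nat) : Int) - 1) - ((k : Nat) : Int) := by omega
      rw [pvCells_getD _ _ h0]
      have ht : ((((b : Nat) : Int) - 1) - ((k : Nat) : Int)).toNat = a + (b - a - 1 - k) := by omega
      rw [pvCellsD, ht, pvD, hdl, List.map_map]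
      congr 1
      apply List.map_congr_left
      intro r _
      simp only [Function.comp]
      rw [pvPad_getD]
    have hfc : (List.range (b - a)).filter
          ((fun x => ((pvEvents rows.dropLast).foldl (fun d p => d.modify p.1 [] (fun s => s ++ [p.2])) PySem.Dict.empty).contains x) ∘ (fun (k : Nat) => (((b : Nat) : Int) - 1) - ((k : Nat) : Int)))
        = (List.range (b - a)).filter (fun k => decide (pvD (rows.map (fun r => pvLjust r W)) a b k ≠ [])) := by
      apply List.filter_congr
      intro k hk
      have hk' : k < b - a := List.mem_range.mp hk
      have h0 : (0 : Int) ≤ (((b : Nat) : Int) - 1) - ((k : Nat) : Int) := by omega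
      simp only [Function.comp]
      apply Bool.eq_iff_iff.mpr
      rw [decide_eq_true_eq, pvCells_contains _ _ h0]
      have heq := hgd k hk
      rw [pvCells_getD _ _ h0] at heq
      rw [heq]
    rw [hfc]
    apply List.map_congr_left
    intro k hk2
    simp only [Function.comp]
    rw [hgd k (List.mem_of_mem_filter hk2)]

theorem pvMain (lines : List String) (h : lines ≠ []) :
    split_cols lines = split_cols_alt lines := by
  set rows := lines.map (fun line => pvRstripNl line.toList) with hrows
  have hrne : rows ≠ [] := by simp [hrows, h]
  set W : Nat := (PySem.List.max? (rows.map (fun r => r.length)) (fun v => v)).getD 0 with hW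
  set G : List (List Char) := rows.map (fun r => pvLjust r W) with hG
  have hlenle : ∀ r ∈ rows, r.length ≤ W := by
    intro r hr
    rcases ho : PySem.List.max? (rows.map (fun r => r.length)) (fun v => v) with _ | m
    · exact absurd ((PySem.List.max?_eq_none_iff _ _).mp ho) (by simp [hrne])
    · have hle := PySem.List.max?_isMax ho _ (List.mem_map_of_mem hr)
      rw [hW, ho]
      simpa using hle
  have hwA : (PySem.List.max? (lines.map (fun line => (pvRstripNl line.toList).length)) (fun v => v)).getD 0 = W := by
    rw [hW, hrows, List.map_map]
    rfl
  have hgA : lines.map (fun line => pvLjust (pvRstripNl line.toList) W) = G := by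
    rw [hG, hrows, List.map_map]
    rfl
  have hA : split_cols lines = (pvGrp (pvL G W)).map (fun ab => pvFA G ab) := by
    simp only [split_cols]
    rw [hwA, hgA, pvA_fold G W, pvGrp_blocks]
    have hfn : (fun (res : List (List String)) (ab : Int × Int) => res ++ [pvFA G ab])
        = (fun (res : List (List String)) ab =>
            let a := ab.1
            let b := ab.2
            let slice_rows := G.map (fun row => PySem.List.slice row (some a) (some b))
            let last := PySem.List.pyGetD slice_rows (-1) []
            let op : String := if PySem.Chars.isIn ['*'] last then "*" else "+"
            let digits_rows := PySem.List.slice slice_rows none (some (-1))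
            let h := digits_rows.length
            let w : Int := b - a
            let nums := (PySem.List.pyRange (w - 1) (-1) (-1)).foldl (fun (nums : List String) x =>
                let col_chars := (PySem.List.pyRange 0 (h : Int) 1).map (fun r =>
                    PySem.List.pyGetD (PySem.List.pyGetD digits_rows r []) x ' ')
                let digs := col_chars.filter (fun ch => !(ch == ' '))
                if digs ≠ [] then nums ++ [String.ofList digs] else nums) []
            res ++ [[op] ++ nums]) := by
      funext res ab
      rfl
    rw [← hfn, PySem.List.foldl_append_singleton_eq_map (fun ab => pvFA G ab)]
    simp
  rw [hA]
  simp only [split_cols_alt]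
  rw [← hrows]
  have hlastB : PySem.List.pyGetD rows (-1) [] = rows.getLast hrne := by
    rw [pvPyGetD_neg_one _ _ hrne, List.getLast?_eq_some_getLast hrne]
    rfl
  rw [hlastB, PySem.List.slice_to_neg_one, pvCells_eq, pvSorted rows W hrne hlenle, ← hG]
  have hgrp : (pvL G W).foldl (fun (g : List (Int × Int)) x =>
      match g.getLast? with
      | some p => if p.2 == x then g.dropLast ++ [(p.1, x + 1)] else g ++ [(x, x + 1)]
      | none => [(x, x + 1)]) [] = pvGrp (pvL G W) := rfl
  rw [hgrp]
  apply List.map_congr_left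
  intro ab hab
  obtain ⟨h0, h1, h2⟩ := pvGrp_bounds G W ab hab
  obtain ⟨x, y⟩ := ab
  have hx : x = ((x.toNat : Nat) : Int) := (Int.toNat_of_nonneg h0).symm
  have hy : y = ((y.toNat : Nat) : Int) := by
    have : (0 : Int) ≤ y := le_trans h0 (le_of_lt h1)
    exact (Int.toNat_of_nonneg this).symm
  rw [hx, hy]
  exact (pvBlock_eq rows W hrne hlenle x.toNat y.toNat (by omega) (by omega)).symm

-- ===== VERDICT (by name: the statement is the Claim_ definition above) =====
theorem split_cols_spec : Claim_equal_split_cols := by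
  intro lines _ hPre
  unfold Spec_split_cols
  exact (pvMain lines hPre).symm ▸ rfl
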